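-- pv_equiv track=rewrite | github.com/effect/bii-14s | kolchanova/B-6.py | previousvector
-- ===== SOURCE A (Python) =====
-- def previousvector (seq):
-- 	result = seq[:]
-- 	for x,y in reversed(list(enumerate(seq))):
-- 		if y == '1':
-- 			result[x] = '0'
-- 			return result
-- 		else:
-- 			result[x] = '1'
-- 	return ['-']
-- ===== SOURCE B (Python) =====
-- def previousvector(seq):
--     try:
--         j = seq[::-1].index('1')
--     except ValueError:
--         return ['-']
--     idx = len(seq) - 1 - j
--     return list(seq[:idx]) + ['0'] + ['1'] * j
-- ===== Notes on version B (the rewrite author's own statement) =====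
-- stated objective: faster
-- what changed: Replaced A's single reverse borrow loop with early return by a locate-then-build pair: find the index of the last '1' via reversed .index (ValueError -> ['-']), then construct the result as unchanged prefix + '0' + a block of '1's.
import Mathlib
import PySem

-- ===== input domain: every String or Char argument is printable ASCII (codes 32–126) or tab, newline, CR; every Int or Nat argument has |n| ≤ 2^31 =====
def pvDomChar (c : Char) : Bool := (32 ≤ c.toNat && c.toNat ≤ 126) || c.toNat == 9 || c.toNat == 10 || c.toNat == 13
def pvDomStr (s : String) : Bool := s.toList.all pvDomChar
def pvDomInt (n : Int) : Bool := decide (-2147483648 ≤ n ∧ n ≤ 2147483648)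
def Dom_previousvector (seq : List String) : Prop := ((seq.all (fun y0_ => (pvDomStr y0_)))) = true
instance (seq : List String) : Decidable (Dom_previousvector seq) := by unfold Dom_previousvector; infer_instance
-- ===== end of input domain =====

-- ===== PORT A =====
-- A walks the enumerated sequence in reverse, turning non-'1' entries into '1'
-- until it meets a '1', which it turns into '0' and returns; ['-'] if no '1'.
-- (enumerate indices are always ≥ 0, so .toNat on them is exact.)
def pvLoopA (r : List String) : List (Int × String) → List String
  | [] => ["-"]
  | (x, y) :: rest =>
      if y = "1" then r.set x.toNat "0"
      else pvLoopA (r.set x.toNat "1") rest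

def previousvector (seq : List String) : List String :=
  pvLoopA seq (PySem.List.enumerate seq).reverse

-- ===== PORT B =====
-- B: locate the last '1' via reversed .index (none -> ['-']), then build
-- prefix ++ '0' ++ block of j ones.
def previousvector_alt (seq : List String) : List String :=
  match PySem.List.index? seq.reverse "1" with
  | none => ["-"]
  | some j => seq.take (seq.length - 1 - j) ++ "0" :: List.replicate j "1"

-- ===== PRECONDITION & SPEC =====
def Spec_previousvector (seq : List String) (out : List String) : Prop := out = previousvector_alt seq
instance (seq : List String) (out : List String) : Decidable (Spec_previousvector seq out) := by unfold Spec_previousvector; infer_instance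

-- ===== CLAIM (what is proved, stated in full; the proofs are below) =====
def Claim_equal_previousvector : Prop := ∀ (seq : List String), Dom_previousvector seq → Spec_previousvector seq (previousvector seq)

-- ===== LEMMAS AND PROOFS =====

-- Characterisation of A's loop, generalised over the (possibly longer) result list r.
lemma pvLoopA_char (s : List String) : ∀ (r : List String), s.length ≤ r.length →
    pvLoopA r (PySem.List.enumerate s).reverse =
      match PySem.List.index? s.reverse "1" with
      | none => ["-"]
      | some j => r.take (s.length - 1 - j) ++ "0" :: (List.replicate j "1" ++ r.drop s.length) := by
  induction s using List.reverseRecOn with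
  | nil =>
      intro r _
      simp [pvLoopA, PySem.List.enumerate, PySem.List.index?]
  | append_singleton s' a ih =>
      intro r hr
      have hlen : s'.length < r.length := by simpa using hr
      rw [PySem.List.enumerate_append]
      simp only [PySem.List.enumerate_cons, PySem.List.enumerate_nil,
        List.reverse_append, List.reverse_cons, List.reverse_nil,
        List.nil_append, List.cons_append]
      by_cases ha : a = "1"
      · subst ha
        rw [PySem.List.index?_cons_self]
        simp only [pvLoopA, List.set_eq_take_append_cons_drop]
        simp [hlen, Int.toNat_natCast]
      · rw [PySem.List.index?_cons_of_ne _ ha]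
        cases hidx : PySem.List.index? s'.reverse "1" with
        | none =>
            simp only [pvLoopA, if_neg ha, Option.map_none]
            rw [ih _ (by simp; omega), hidx]
        | some j =>
            have hj : j < s'.length := by
              obtain ⟨hk, -, -⟩ := PySem.List.getElem_of_index?_eq_some hidx
              simpa using hk
            simp only [pvLoopA, if_neg ha, Option.map_some]
            rw [ih _ (by simp; omega), hidx]
            simp only [List.take_set, List.drop_set,
              List.length_append, List.length_singleton]
            have h0 : ((0 : Int) + (s'.length : Int)).toNat = s'.length := by simp
            have h2 : s'.length + 1 - 1 - (j + 1) = s'.length - 1 - j := by omega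
            simp only [h0, List.set_eq_take_append_cons_drop, List.length_take,
              List.replicate_succ',
              List.append_assoc, List.cons_append, List.nil_append, h2]
            have h3 : ¬ s'.length < min (s'.length - 1 - j) r.length := by omega
            have h4 : ¬ s'.length < s'.length := by omega
            rw [if_neg h3, if_neg h4,
              if_pos (by simp [List.length_drop]; omega)]
            simp [List.drop_drop]

theorem previousvector_spec : Claim_equal_previousvector := by
  intro seq _
  unfold Spec_previousvector previousvector previousvector_alt
  rw [pvLoopA_char seq seq le_rfl]
  cases hidx : PySem.List.index? seq.reverse "1" with
  | none => rfl
  | some j => simp
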